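-- pv_equiv track=rewrite | github.com/JellevanKoppen/advent_of_code_jelle | day4/day4.py | delete_offset
-- ===== SOURCE A (Python) =====
-- def delete_offset(puzzle_input):
--     offset = 0
--     puzzle_output = []
--     for line in puzzle_input:
--         if offset == 3:
--             offset = 0  # Reset offset
--         else:
--             offset += 1
--             puzzle_output.append(line[:-offset])
--     return puzzle_output
-- ===== SOURCE B (Python) =====
-- def delete_offset(puzzle_input):
--     lines = list(puzzle_input)
--     out = []
--     j = 0
--     while j < len(lines):
--         out += [line[:-n] for n, line in zip((1, 2, 3), lines[j:j+3])]
--         j += 4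
--     return out
-- ===== Notes on version B (the rewrite author's own statement) =====
-- stated objective: alternative
-- what changed: Replaces A's single pass threading a mutable offset counter (with a reset branch) by a block-of-four loop that zips each block's first three lines with the fixed truncation amounts (1,2,3), computing nothing per line from running state.
import Mathlib
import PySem

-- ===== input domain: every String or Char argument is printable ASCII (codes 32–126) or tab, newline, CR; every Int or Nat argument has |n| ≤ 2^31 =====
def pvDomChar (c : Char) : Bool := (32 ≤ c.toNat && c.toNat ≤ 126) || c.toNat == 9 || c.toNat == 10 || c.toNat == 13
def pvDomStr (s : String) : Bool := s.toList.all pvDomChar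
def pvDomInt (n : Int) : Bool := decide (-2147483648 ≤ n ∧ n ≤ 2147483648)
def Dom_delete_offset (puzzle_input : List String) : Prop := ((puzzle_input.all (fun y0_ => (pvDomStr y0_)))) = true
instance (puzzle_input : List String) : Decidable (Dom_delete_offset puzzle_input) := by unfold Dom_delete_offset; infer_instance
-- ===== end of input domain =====

-- B replaces A's single pass with a threaded mutable offset counter by a block-of-four loop
-- that zips each block's first three lines with the fixed truncation amounts (1,2,3);
-- same cost, a different (chunked) decomposition with no running counter.

-- ===== PORT A =====
-- A's loop body, threading the state (offset, puzzle_output).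
def deleteOffsetStep (st : Int × List String) (line : String) : Int × List String :=
  if st.1 == 3 then (0, st.2)
  else (st.1 + 1, st.2 ++ [PySem.Str.slice line none (some (-(st.1 + 1)))])

def delete_offset (puzzle_input : List String) : List String :=
  (puzzle_input.foldl deleteOffsetStep (0, [])).2

-- ===== PORT B =====
-- Source B's while loop: out += [line[:-n] for n,line in zip((1,2,3), lines[j:j+3])]; j += 4
def deleteOffsetAltGo (lines : List String) (j : Nat) : List String :=
  if j < lines.length then
    ((List.zip [(1 : Int), 2, 3] (PySem.List.slice lines (some (j : Int)) (some ((j : Int) + 3)))).map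
      (fun p => PySem.Str.slice p.2 none (some (-p.1))))
      ++ deleteOffsetAltGo lines (j + 4)
  else []
  termination_by lines.length - j

def delete_offset_alt (puzzle_input : List String) : List String :=
  deleteOffsetAltGo puzzle_input 0

-- ===== PRECONDITION & SPEC =====
def Spec_delete_offset (puzzle_input : List String) (out : List String) : Prop := out = delete_offset_alt puzzle_input
instance (puzzle_input : List String) (out : List String) : Decidable (Spec_delete_offset puzzle_input out) := by unfold Spec_delete_offset; infer_instance

-- ===== CLAIM (what is proved, stated in full; the proofs are below) =====
def Claim_equal_delete_offset : Prop := ∀ (puzzle_input : List String), Dom_delete_offset puzzle_input → Spec_delete_offset puzzle_input (delete_offset puzzle_input)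

-- ===== LEMMAS AND PROOFS =====
-- Proof-only restatement of B's loop as structural recursion on blocks of four.
def altRec (xs : List String) : List String :=
  match xs with
  | [] => []
  | l :: rest =>
    ((List.zip [(1 : Int), 2, 3] ((l :: rest).take 3)).map
      (fun p => PySem.Str.slice p.2 none (some (-p.1))))
      ++ altRec ((l :: rest).drop 4)
  termination_by xs.length
  decreasing_by simp

theorem altGo_eq_altRec (n : Nat) : ∀ (lines : List String) (j : Nat),
    lines.length - j ≤ n → deleteOffsetAltGo lines j = altRec (lines.drop j) := by
  induction n with
  | zero =>
    intro lines j h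
    have hj : ¬ j < lines.length := by omega
    rw [deleteOffsetAltGo]
    rw [List.drop_eq_nil_of_le (show lines.length ≤ j by omega)]
    simp [hj, altRec.eq_1]
  | succ n ih =>
    intro lines j h
    by_cases hj : j < lines.length
    · rw [deleteOffsetAltGo]
      have hsl : PySem.List.slice lines (some (j : Int)) (some ((j : Int) + 3))
          = (lines.drop j).take 3 := by
        rw [show ((j : Int) + 3) = ((j : Int) + ((3 : Nat) : Int)) by norm_num,
          PySem.List.slice_natCast_add]
      obtain ⟨l, rest, hd⟩ : ∃ l rest, lines.drop j = l :: rest := by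
        rcases hx : lines.drop j with _ | ⟨l, rest⟩
        · exfalso; have := List.length_drop (l := lines) (i := j); rw [hx] at this; simp at this; omega
        · exact ⟨l, rest, rfl⟩
      rw [if_pos hj, hsl, hd, altRec]
      rw [ih lines (j + 4) (by omega)]
      rw [← hd, List.drop_drop]
    · rw [deleteOffsetAltGo]
      rw [List.drop_eq_nil_of_le (show lines.length ≤ j by omega)]
      simp [hj, altRec.eq_1]

theorem delete_offset_loop_eq (n : Nat) : ∀ (xs : List String), xs.length ≤ n → ∀ (acc : List String),
    (xs.foldl deleteOffsetStep (0, acc)).2 = acc ++ altRec xs := by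
  induction n with
  | zero =>
    intro xs h acc
    have : xs = [] := List.eq_nil_of_length_eq_zero (Nat.le_zero.mp h)
    subst this
    simp [altRec.eq_1]
  | succ n ih =>
    intro xs h acc
    match xs with
    | [] => simp [altRec.eq_1]
    | [a] =>
      rw [altRec]
      simp [altRec.eq_1, List.foldl, deleteOffsetStep]
    | [a, b] =>
      rw [altRec]
      simp [altRec.eq_1, List.foldl, deleteOffsetStep]
    | [a, b, c] =>
      rw [altRec]
      simp [altRec.eq_1, List.foldl, deleteOffsetStep]
    | a :: b :: c :: d :: rest =>
      have hr : rest.length ≤ n := by simp at h; omega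
      rw [altRec]
      simp only [List.foldl_cons]
      simp only [deleteOffsetStep]
      norm_num
      rw [ih rest hr]
      simp

-- ===== VERDICT (by name: the statement is the Claim_ definition above) =====
theorem delete_offset_spec : Claim_equal_delete_offset := by
  intro xs _
  unfold Spec_delete_offset delete_offset delete_offset_alt
  rw [altGo_eq_altRec xs.length xs 0 (by omega)]
  simpa using delete_offset_loop_eq xs.length xs le_rfl []
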